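-- pv_equiv track=rewrite | github.com/miliar/Code_Jam_Webscraper | solutions_python/Problem_199/3977.py | flip_k_cakes
-- ===== SOURCE A (Python) =====
-- def flip(cake):
--     """flip the cake"""
--     if cake == "+":
--         return "-"
--     else:
--         return "+"
--
-- def flip_k_cakes(cakes, k, index):
--     """flip the k cakes starting at index"""
--     flippedcakes = ""
--     for j, cake in enumerate(cakes):
--         if index <= j < (index + k):
--             flippedcakes += flip(cake)
--         else:
--             flippedcakes += cake
--     return flippedcakes
-- ===== SOURCE B (Python) =====
-- def flip_k_cakes(cakes, k, index):
--     """flip the k cakes starting at index"""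
--     lo = max(index, 0)
--     hi = max(index + k, lo)
--     window = "".join("-" if c == "+" else "+" for c in cakes[lo:hi])
--     return cakes[:lo] + window + cakes[hi:]
-- ===== Notes on version B (the rewrite author's own statement) =====
-- stated objective: simpler
-- what changed: Replaces the per-character enumerate loop that branches on every index and rebuilds the string by repeated concatenation with three slices: the prefix and suffix are copied wholesale and only the clamped k-wide window is mapped through the flip.
import Mathlib
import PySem

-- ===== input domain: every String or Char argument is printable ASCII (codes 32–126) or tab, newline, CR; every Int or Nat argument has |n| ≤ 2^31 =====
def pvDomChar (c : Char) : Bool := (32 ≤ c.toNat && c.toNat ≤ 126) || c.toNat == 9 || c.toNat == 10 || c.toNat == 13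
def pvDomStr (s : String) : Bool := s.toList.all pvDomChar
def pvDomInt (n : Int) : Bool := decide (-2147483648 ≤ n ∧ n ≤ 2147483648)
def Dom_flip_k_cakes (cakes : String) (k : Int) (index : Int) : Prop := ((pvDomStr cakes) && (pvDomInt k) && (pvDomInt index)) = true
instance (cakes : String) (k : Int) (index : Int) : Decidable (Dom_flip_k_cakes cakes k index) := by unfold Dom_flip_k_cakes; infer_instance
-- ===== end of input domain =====

-- B replaces A's per-character enumerate-and-branch loop by three slices (prefix, flipped window, suffix),
-- flipping only the k-wide window; objective: simpler.


-- ===== PORT A =====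
-- helper `flip` (Python returns a one-character string; here a Char, appended as a singleton)
def pyFlip (cake : Char) : Char := if cake = '+' then '-' else '+'

def flip_k_cakes (cakes : String) (k : Int) (index : Int) : String :=
  String.ofList <|
    (PySem.List.enumerate cakes.toList 0).foldl
      (fun flippedcakes jc =>
        if index ≤ jc.1 ∧ jc.1 < index + k then flippedcakes ++ [pyFlip jc.2]
        else flippedcakes ++ [jc.2])
      []

-- ===== PORT B =====
def flip_k_cakes_alt (cakes : String) (k : Int) (index : Int) : String :=
  let lo : Int := max index 0
  let hi : Int := max (index + k) lo
  let s := cakes.toList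
  let window := (PySem.List.slice s (some lo) (some hi)).map
    (fun c => if c = '+' then '-' else '+')
  String.ofList (PySem.List.slice s none (some lo) ++ window ++ PySem.List.slice s (some hi) none)

-- ===== PRECONDITION & SPEC =====
def Spec_flip_k_cakes (cakes : String) (k : Int) (index : Int) (out : String) : Prop := out = flip_k_cakes_alt cakes k index
instance (cakes : String) (k : Int) (index : Int) (out : String) : Decidable (Spec_flip_k_cakes cakes k index out) := by unfold Spec_flip_k_cakes; infer_instance

-- ===== CLAIM (what is proved, stated in full; the proofs are below) =====
def Claim_equal_flip_k_cakes : Prop := ∀ (cakes : String) (k : Int) (index : Int), Dom_flip_k_cakes cakes k index → Spec_flip_k_cakes cakes k index (flip_k_cakes cakes k index)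

-- ===== LEMMAS AND PROOFS =====

-- the windowed map over enumerate equals prefix ++ mapped window ++ suffix, for 0 ≤ lo ≤ hi
theorem pv_enum_map_window {α : Type} (f : α → α) :
    ∀ (l : List α) (lo hi : Int), 0 ≤ lo → lo ≤ hi →
    (PySem.List.enumerate l 0).map (fun p => if lo ≤ p.1 ∧ p.1 < hi then f p.2 else p.2)
      = l.take lo.toNat ++ ((l.drop lo.toNat).take (hi.toNat - lo.toNat)).map f ++ l.drop hi.toNat := by
  intro l
  induction l with
  | nil => intro lo hi _ _; simp [PySem.List.enumerate]
  | cons c t ih =>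
    intro lo hi h0 hlh
    rw [PySem.List.enumerate_cons, List.map_cons]
    have hshift : ∀ (g : Int → α → α),
        (PySem.List.enumerate t (0 + 1)).map (fun p => g p.1 p.2)
          = (PySem.List.enumerate t 0).map (fun p => g (p.1 + 1) p.2) := by
      intro g
      have : ∀ (t : List α) (s : Int),
          (PySem.List.enumerate t (s + 1)).map (fun p => g p.1 p.2)
            = (PySem.List.enumerate t s).map (fun p => g (p.1 + 1) p.2) := by
        intro t
        induction t with
        | nil => intro s; simp [PySem.List.enumerate]
        | cons x xs ih2 => intro s; rw [PySem.List.enumerate_cons, PySem.List.enumerate_cons,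
            List.map_cons, List.map_cons, ih2]
      simpa using this t 0
    rw [hshift (fun j x => if lo ≤ j ∧ j < hi then f x else x)]
    by_cases hlo : lo = 0
    · subst hlo
      by_cases hhi : hi = 0
      · subst hhi
        simp only [List.drop_zero, List.take_zero, Int.toNat_zero, List.nil_append]
        have : ∀ p ∈ PySem.List.enumerate t 0,
            (if (0:Int) ≤ p.1 + 1 ∧ p.1 + 1 < 0 then f p.2 else p.2) = p.2 := by
          intro p hp
          rcases (PySem.List.mem_enumerate_iff t 0 p).1 hp with ⟨m, hm, rfl⟩
          simp
        rw [List.map_congr_left this]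
        simp [PySem.List.map_snd_enumerate]
      · have hhi' : 0 < hi := lt_of_le_of_ne hlh (Ne.symm hhi)
        have hcond : (if (0:Int) ≤ 0 ∧ (0:Int) < hi then f c else c) = f c := by
          simp [hhi']
        rw [hcond]
        have hcong : ∀ p ∈ PySem.List.enumerate t 0,
            (if (0:Int) ≤ p.1 + 1 ∧ p.1 + 1 < hi then f p.2 else p.2)
              = (if (0:Int) ≤ p.1 ∧ p.1 < hi - 1 then f p.2 else p.2) := by
          intro p hp
          rcases (PySem.List.mem_enumerate_iff t 0 p).1 hp with ⟨m, hm, rfl⟩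
          have hiff : ((0:Int) ≤ ((0:Int) + m, t[m]).1 + 1 ∧ ((0:Int) + m, t[m]).1 + 1 < hi)
              ↔ ((0:Int) ≤ ((0:Int) + m, t[m]).1 ∧ ((0:Int) + m, t[m]).1 < hi - 1) := by
            simp only []; omega
          simp only [hiff]
        rw [List.map_congr_left hcong, ih 0 (hi - 1) le_rfl (by omega)]
        have h1 : hi.toNat = (hi - 1).toNat + 1 := by omega
        rw [h1]
        simp
    · have hlo' : 0 < lo := lt_of_le_of_ne h0 (Ne.symm hlo)
      have hcond : (if lo ≤ 0 ∧ (0:Int) < hi then f c else c) = c := by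
        have : ¬ (lo ≤ 0 ∧ (0:Int) < hi) := by omega
        simp [this]
      rw [hcond]
      have hcong : ∀ p ∈ PySem.List.enumerate t 0,
          (if lo ≤ p.1 + 1 ∧ p.1 + 1 < hi then f p.2 else p.2)
            = (if lo - 1 ≤ p.1 ∧ p.1 < hi - 1 then f p.2 else p.2) := by
        intro p hp
        rcases (PySem.List.mem_enumerate_iff t 0 p).1 hp with ⟨m, hm, rfl⟩
        have hiff : (lo ≤ ((0:Int) + m, t[m]).1 + 1 ∧ ((0:Int) + m, t[m]).1 + 1 < hi)
            ↔ (lo - 1 ≤ ((0:Int) + m, t[m]).1 ∧ ((0:Int) + m, t[m]).1 < hi - 1) := by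
          simp only []; omega
        simp only [hiff]
      rw [List.map_congr_left hcong, ih (lo - 1) (hi - 1) (by omega) (by omega)]
      have h1 : lo.toNat = (lo - 1).toNat + 1 := by omega
      have h2 : hi.toNat = (hi - 1).toNat + 1 := by omega
      have h3 : hi.toNat - lo.toNat = (hi - 1).toNat - (lo - 1).toNat := by omega
      rw [h3, h1, h2]
      simp

theorem flip_k_cakes_eq (cakes : String) (k : Int) (index : Int) :
    flip_k_cakes cakes k index = flip_k_cakes_alt cakes k index := by
  simp only [flip_k_cakes, flip_k_cakes_alt]
  set lo : Int := max index 0 with hlo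
  set hi : Int := max (index + k) lo with hhi
  have h0 : 0 ≤ lo := le_max_right _ _
  have hlh : lo ≤ hi := le_max_right _ _
  have hstep : (fun (flippedcakes : List Char) (jc : Int × Char) =>
        if index ≤ jc.1 ∧ jc.1 < index + k then flippedcakes ++ [pyFlip jc.2]
        else flippedcakes ++ [jc.2])
      = (fun flippedcakes jc =>
        flippedcakes ++ [if index ≤ jc.1 ∧ jc.1 < index + k then pyFlip jc.2 else jc.2]) := by
    funext acc jc
    by_cases h : index ≤ jc.1 ∧ jc.1 < index + k <;> simp [h]
  rw [hstep, PySem.List.foldl_append_singleton_eq_map, List.nil_append]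
  have hcong : ∀ p ∈ PySem.List.enumerate cakes.toList 0,
      (if index ≤ p.1 ∧ p.1 < index + k then pyFlip p.2 else p.2)
        = (if lo ≤ p.1 ∧ p.1 < hi then pyFlip p.2 else p.2) := by
    intro p hp
    rcases (PySem.List.mem_enumerate_iff cakes.toList 0 p).1 hp with ⟨m, hm, rfl⟩
    have hiff : (index ≤ ((0:Int) + m, cakes.toList[m]).1 ∧ ((0:Int) + m, cakes.toList[m]).1 < index + k)
        ↔ (lo ≤ ((0:Int) + m, cakes.toList[m]).1 ∧ ((0:Int) + m, cakes.toList[m]).1 < hi) := by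
      simp only [hlo, hhi]; omega
    simp only [hiff]
  rw [List.map_congr_left hcong, pv_enum_map_window pyFlip cakes.toList lo hi h0 hlh,
    PySem.List.slice_to cakes.toList h0, PySem.List.slice_toNat cakes.toList h0 (le_trans h0 hlh),
    PySem.List.slice_from cakes.toList (le_trans h0 hlh)]
  rfl

-- ===== VERDICT (by name: the statement is the Claim_ definition above) =====
theorem flip_k_cakes_spec : Claim_equal_flip_k_cakes := by
  intro cakes k index _
  unfold Spec_flip_k_cakes
  exact flip_k_cakes_eq cakes k index
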